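-- pv_equiv track=rewrite | github.com/jmilbauer/atticus | immigration/simple_reader.py | find_label
-- ===== SOURCE A (Python) =====
-- def find_label(text, sentences):
--     """
--     Given a body of text from a judicial decision (BIA), come up with a label
--     """
--
--     # positive_regexes =  [ "appeal.*dismissed"
--     #                     , "appeal.*denied"
--     #                     , "appeal.*rejected"
--     #                     ]
--
--     order_sentence = []
--     for sentence in sentences:
--         found_order = False
--         for word in sentence.split():
--             if word.lower() == "order:":
--                 found_order = True
--             if found_order:
--                 order_sentence.append(word)
--
--     return order_sentence
-- ===== SOURCE B (Python) =====
-- def find_label(text, sentences):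
--     """
--     Given a body of text from a judicial decision (BIA), come up with a label
--     """
--     order_sentence = []
--     for sentence in sentences:
--         words = sentence.split()
--         lowered = [w.lower() for w in words]
--         if "order:" in lowered:
--             order_sentence.extend(words[lowered.index("order:"):])
--     return order_sentence
-- ===== Notes on version B (the rewrite author's own statement) =====
-- stated objective: simpler
-- what changed: Replaces the per-word running boolean flag with find-the-first-'order:'-index-then-bulk-copy-suffix per sentence.
import Mathlib
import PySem

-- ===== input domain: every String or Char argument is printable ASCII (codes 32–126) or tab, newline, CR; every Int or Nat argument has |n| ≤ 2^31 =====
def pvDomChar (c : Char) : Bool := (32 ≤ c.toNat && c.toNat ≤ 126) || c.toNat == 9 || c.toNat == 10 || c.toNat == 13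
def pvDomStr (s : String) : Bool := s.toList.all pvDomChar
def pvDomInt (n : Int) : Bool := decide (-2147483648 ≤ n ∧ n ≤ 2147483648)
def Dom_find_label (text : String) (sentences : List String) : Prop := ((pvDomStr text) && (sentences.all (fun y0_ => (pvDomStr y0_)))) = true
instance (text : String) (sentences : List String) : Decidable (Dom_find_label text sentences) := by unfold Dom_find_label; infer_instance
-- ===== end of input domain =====

-- B replaces A's per-word running boolean flag with find-first-'order:'-index-then-copy-suffix; simpler, same cost.

-- ===== PORT A =====
-- one word of A's inner loop: update the flag, then conditionally append
def pvStepA (st : Bool × List String) (word : String) : Bool × List String :=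
  let found := if PySem.Str.lower word == "order:" then true else st.1
  (found, if found then st.2 ++ [word] else st.2)

def find_label (text : String) (sentences : List String) : List String :=
  sentences.foldl (fun order_sentence sentence =>
    ((PySem.Str.split₀ sentence).foldl pvStepA (false, order_sentence)).2) []

-- ===== PORT B =====
-- one sentence of B: lowercase the words, locate "order:", bulk-copy the suffix
-- (words[i:] for the 0 ≤ i ≤ len index returned by .index is exactly List.drop i)
def pvSentB (acc : List String) (sentence : String) : List String :=
  let words := PySem.Str.split₀ sentence
  let lowered := words.map PySem.Str.lower
  if lowered.contains "order:" then
    match PySem.List.index? lowered "order:" with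
    | some i => acc ++ words.drop i
    | none => acc          -- unreachable: guarded by the membership test
  else acc

def find_label_alt (text : String) (sentences : List String) : List String :=
  sentences.foldl pvSentB []

-- ===== PRECONDITION & SPEC =====
def Spec_find_label (text : String) (sentences : List String) (out : List String) : Prop := out = find_label_alt text sentences
instance (text : String) (sentences : List String) (out : List String) : Decidable (Spec_find_label text sentences out) := by unfold Spec_find_label; infer_instance

-- ===== CLAIM (what is proved, stated in full; the proofs are below) =====
def Claim_equal_find_label : Prop := ∀ (text : String) (sentences : List String), Dom_find_label text sentences → Spec_find_label text sentences (find_label text sentences)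

-- ===== LEMMAS AND PROOFS =====

-- once the flag is true, A's inner loop appends every remaining word
theorem pvStepA_true (ws : List String) (acc : List String) :
    ws.foldl pvStepA (true, acc) = (true, acc ++ ws) := by
  induction ws generalizing acc with
  | nil => simp
  | cons w t ih => simp [pvStepA, ih]

-- A's inner loop from flag = false computes B's suffix copy, over a plain word list
theorem pvInner_core (ws : List String) (acc : List String) :
    (ws.foldl pvStepA (false, acc)).2 =
      if (ws.map PySem.Str.lower).contains "order:" then
        match PySem.List.index? (ws.map PySem.Str.lower) "order:" with
        | some i => acc ++ ws.drop i
        | none => acc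
      else acc := by
  induction ws generalizing acc with
  | nil => simp
  | cons w t ih =>
    by_cases h : PySem.Str.lower w = "order:"
    · have hb : (PySem.Str.lower w == "order:") = true := by simp [h]
      have hidx : PySem.List.index? ((w :: t).map PySem.Str.lower) "order:" = some 0 := by
        rw [List.map_cons, h]; exact PySem.List.index?_cons_self _ _
      have hmem : ((w :: t).map PySem.Str.lower).contains "order:" = true := by simp [h]
      rw [List.foldl_cons]
      have hstep : pvStepA (false, acc) w = (true, acc ++ [w]) := by simp [pvStepA, hb]
      rw [hstep, pvStepA_true, hidx, if_pos hmem]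
      simp
    · have hb : (PySem.Str.lower w == "order:") = false := by simp [h]
      rw [List.foldl_cons]
      have hstep : pvStepA (false, acc) w = (false, acc) := by simp [pvStepA, hb]
      rw [hstep, ih acc]
      rw [List.map_cons, PySem.List.index?_cons_of_ne _ (by simpa using h)]
      cases hidx : PySem.List.index? (t.map PySem.Str.lower) "order:" with
      | none =>
        have hnm : "order:" ∉ t.map PySem.Str.lower := (PySem.List.index?_eq_none_iff _ _).mp hidx
        simp [hnm]
      | some i =>
        have hmem : "order:" ∈ t.map PySem.Str.lower :=
          (PySem.List.index?_isSome_iff _ _).mp (by rw [hidx]; rfl)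
        simp [hmem]

theorem pvInner_eq (s : String) (acc : List String) :
    ((PySem.Str.split₀ s).foldl pvStepA (false, acc)).2 = pvSentB acc s := by
  rw [pvInner_core]; rfl

theorem pv_main (sentences : List String) (acc : List String) :
    sentences.foldl (fun a s => ((PySem.Str.split₀ s).foldl pvStepA (false, a)).2) acc
      = sentences.foldl pvSentB acc := by
  have hfun : (fun a s => ((PySem.Str.split₀ s).foldl pvStepA (false, a)).2) = pvSentB :=
    funext fun a => funext fun s => pvInner_eq s a
  rw [hfun]

-- ===== VERDICT (by name: the statement is the Claim_ definition above) =====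
theorem find_label_spec : Claim_equal_find_label := by
  intro text sentences _
  unfold Spec_find_label find_label find_label_alt
  exact pv_main sentences []
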